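-- pv_equiv track=rewrite | github.com/Semih1997/CodingBat-Java-Problems-in-Python | Codingbat Java String-3/QnotReplaceDeneme.py | notreplace
-- ===== SOURCE A (Python) =====
-- def notreplace(a):
--     i = 0
--     new_a = ""
--     a += " "
--     while i < len(a):
--         if a[i:i+2] == "is" and (a[i-1].isalpha() == False and a[i+2].isalpha() == False):
--             new_a += a[i:i+2] + " not"
--             i += 2
--         if i == len(a) -1:
--             i += 1
--         else:
--             new_a += a[i]
--             i += 1
--     return new_a
-- ===== SOURCE B (Python) =====
-- def notreplace(a):
--     # Occurrence-jumping span assembly: jump between 'is' occurrences with str.find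
--     # and copy whole spans, instead of A's per-character scan over a padded string.
--     parts = []
--     i = 0
--     n = len(a)
--     while True:
--         j = a.find('is', i)
--         if j == -1:
--             parts.append(a[i:])
--             return ''.join(parts)
--         left = j == 0 or not a[j-1].isalpha()
--         right = j + 2 >= n or not a[j+2].isalpha()
--         if left and right:
--             parts.append(a[i:j+2] + ' not')
--             i = j + 2
--         else:
--             parts.append(a[i:j+1])
--             i = j + 1
-- ===== Notes on version B (the rewrite author's own statement) =====
-- stated objective: faster
-- what changed: B jumps between pattern occurrences with str.find and assembles whole spans into a list joined once, instead of A's per-character while-loop over a space-padded copy that grows the result by repeated string concatenation.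
import Mathlib
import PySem

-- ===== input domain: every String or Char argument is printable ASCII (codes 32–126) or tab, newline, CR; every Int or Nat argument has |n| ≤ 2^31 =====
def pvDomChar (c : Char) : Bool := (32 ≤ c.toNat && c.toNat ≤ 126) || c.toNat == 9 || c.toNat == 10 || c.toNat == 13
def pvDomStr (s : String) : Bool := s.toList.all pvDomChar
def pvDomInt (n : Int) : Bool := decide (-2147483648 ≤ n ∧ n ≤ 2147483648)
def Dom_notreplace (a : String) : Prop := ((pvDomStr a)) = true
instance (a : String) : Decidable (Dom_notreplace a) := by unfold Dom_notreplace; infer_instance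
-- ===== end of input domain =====

-- B replaces A's per-character scan over a padded copy (which grows the result by
-- repeated string concatenation) by occurrence-jumping span assembly with str.find
-- and a single join (objective: faster; measured faster in a timing run).

-- ===== PORT A =====
-- while-loop of A: i is a Python int (a[i-1] may be the negative index -1), the
-- string was padded with a trailing space (a += " ").
def notreplaceGo (s : List Char) (i : Int) (acc : List Char) : List Char :=
  if _h : i < (s.length : Int) then
    if PySem.List.slice s (some i) (some (i + 2)) = ['i', 's']
        ∧ PySem.Chars.isalpha (PySem.List.pyGetD s (i - 1) ' ') = false
        ∧ PySem.Chars.isalpha (PySem.List.pyGetD s (i + 2) ' ') = false then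
      -- new_a += a[i:i+2] + " not"; i += 2; then the second if
      if i + 2 = (s.length : Int) - 1 then
        notreplaceGo s (i + 3) (acc ++ PySem.List.slice s (some i) (some (i + 2)) ++ [' ', 'n', 'o', 't'])
      else
        notreplaceGo s (i + 3) (acc ++ PySem.List.slice s (some i) (some (i + 2)) ++ [' ', 'n', 'o', 't'] ++ [PySem.List.pyGetD s (i + 2) ' '])
    else
      if i = (s.length : Int) - 1 then
        notreplaceGo s (i + 1) acc
      else
        notreplaceGo s (i + 1) (acc ++ [PySem.List.pyGetD s i ' '])
  else acc
termination_by ((s.length : Int) - i).toNat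
decreasing_by all_goals omega

def notreplace (a : String) : String :=
  String.ofList (notreplaceGo (a.toList ++ [' ']) 0 [])

-- ===== PORT B =====
-- termination fact for B's loop: a found 'is' occurrence lies between the cursor
-- and len - 2
theorem findFrom_is_bounds (s : List Char) (i : Nat)
    (h : ¬ PySem.Chars.findFrom s ['i', 's'] (i : Int) none = -1) :
    (i : Int) ≤ PySem.Chars.findFrom s ['i', 's'] (i : Int) none ∧
    PySem.Chars.findFrom s ['i', 's'] (i : Int) none + 2 ≤ (s.length : Int) := by
  have hle : i ≤ s.length := by
    by_contra hi
    push Not at hi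
    apply h
    simp [PySem.Chars.findFrom]
    intro h1
    omega
  obtain ⟨h1, h2, _⟩ := PySem.Chars.findFrom_natCast_spec s ['i', 's'] i hle h
  have hlen := h2.length_le
  simp [List.length_drop] at hlen
  constructor
  · exact h1
  · omega

def notreplaceAltGo (s : List Char) (i : Nat) (parts : List (List Char)) : List Char :=
  let j := PySem.Chars.findFrom s ['i', 's'] (i : Int) none
  if hj : j = -1 then
    (parts ++ [PySem.List.slice s (some (i : Int)) none]).flatten
  else
    if (decide (j = 0) || !PySem.Chars.isalpha (PySem.List.pyGetD s (j - 1) ' '))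
        && (decide ((s.length : Int) ≤ j + 2) || !PySem.Chars.isalpha (PySem.List.pyGetD s (j + 2) ' ')) then
      notreplaceAltGo s (j + 2).toNat (parts ++ [PySem.List.slice s (some (i : Int)) (some (j + 2)) ++ [' ', 'n', 'o', 't']])
    else
      notreplaceAltGo s (j + 1).toNat (parts ++ [PySem.List.slice s (some (i : Int)) (some (j + 1))])
termination_by s.length + 1 - i
decreasing_by
  all_goals (have hb := findFrom_is_bounds s i hj; omega)

def notreplace_alt (a : String) : String :=
  String.ofList (notreplaceAltGo a.toList 0 [])

-- ===== PRECONDITION & SPEC =====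
def Spec_notreplace (a : String) (out : String) : Prop := out = notreplace_alt a
instance (a : String) (out : String) : Decidable (Spec_notreplace a out) := by unfold Spec_notreplace; infer_instance

-- ===== CLAIM (what is proved, stated in full; the proofs are below) =====
def Claim_equal_notreplace : Prop := ∀ (a : String), Dom_notreplace a → Spec_notreplace a (notreplace a)

-- ===== LEMMAS AND PROOFS =====

-- whether the char before position i is alphabetic (string start counts as a boundary)
def prevA (orig : List Char) (i : Nat) : Bool :=
  if i = 0 then false else PySem.Chars.isalpha (orig.getD (i - 1) ' ')

def nonalphaHead : List Char → Bool
  | [] => true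
  | c :: _ => !PySem.Chars.isalpha c

-- common specification both loops compute: scan with a one-char alphabetic lookbehind
def fspec (prev : Bool) (s : List Char) : List Char :=
  match s with
  | [] => []
  | c :: t =>
    if c = 'i' ∧ t.head? = some 's' ∧ prev = false ∧ nonalphaHead t.tail = true then
      'i' :: 's' :: ' ' :: 'n' :: 'o' :: 't' :: fspec true t.tail
    else
      c :: fspec (PySem.Chars.isalpha c) t
termination_by s.length
decreasing_by
  all_goals simp

-- the loop of A, started on the padding space, skips it and stops
theorem aGo_end (orig : List Char) (acc : List Char) :
    notreplaceGo (orig ++ [' ']) (orig.length : Int) acc = acc := by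
  have hlen : (((orig ++ [' ']).length : Nat) : Int) = (orig.length : Int) + 1 := by simp
  have hsl : PySem.List.slice (orig ++ [' ']) (some (orig.length : Int)) (some ((orig.length : Int) + 2)) = [' '] := by
    rw [show (orig.length : Int) + 2 = (orig.length : Int) + ((2 : Nat) : Int) by norm_num,
        PySem.List.slice_natCast_add, List.drop_left]
    rfl
  rw [notreplaceGo, dif_pos (by rw [hlen]; omega)]
  rw [if_neg (by rw [hsl]; rintro ⟨h, -⟩; simp at h)]
  rw [if_pos (by rw [hlen]; ring : (orig.length : Int) = ((orig ++ [' ']).length : Int) - 1)]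
  rw [notreplaceGo, dif_neg (by rw [hlen]; omega)]

theorem aGo_eq (orig : List Char) : ∀ (n i : Nat), orig.length - i ≤ n → i ≤ orig.length →
    ∀ acc, notreplaceGo (orig ++ [' ']) (i : Int) acc = acc ++ fspec (prevA orig i) (orig.drop i) := by
  intro n
  induction n with
  | zero =>
    intro i h1 h2 acc
    have hieq : i = orig.length := by omega
    subst hieq
    rw [aGo_end, List.drop_length, fspec]
    simp
  | succ n ih =>
    intro i h1 h2 acc
    rcases Nat.eq_or_lt_of_le h2 with hieq | hilt
    · subst hieq
      rw [aGo_end, List.drop_length, fspec]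
      simp
    · -- i < orig.length
      have hglt : (i : Int) < ((orig ++ [' ']).length : Int) := by simp; omega
      have hPrevEq : PySem.Chars.isalpha (PySem.List.pyGetD (orig ++ [' ']) ((i : Int) - 1) ' ') = prevA orig i := by
        by_cases h0 : i = 0
        · subst h0
          rw [show ((0 : Nat) : Int) - 1 = -1 by norm_num, PySem.List.pyGetD_neg_one_append_singleton]
          have hpv : prevA orig 0 = false := by simp [prevA]
          rw [hpv]
          decide
        · rw [show (i : Int) - 1 = ((i - 1 : Nat) : Int) by omega, PySem.List.pyGetD_natCast,
              List.getD_eq_getElem?_getD, List.getElem?_append_left (by omega : i - 1 < orig.length)]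
          simp [prevA, h0, List.getD_eq_getElem?_getD]
      have hgi : PySem.List.pyGetD (orig ++ [' ']) (i : Int) ' ' = orig.getD i ' ' := by
        rw [PySem.List.pyGetD_natCast, List.getD_eq_getElem?_getD,
            List.getElem?_append_left (by omega : i < orig.length), ← List.getD_eq_getElem?_getD]
      have hdrops : (orig ++ [' ']).drop i = orig.drop i ++ [' '] :=
        List.drop_append_of_le_length (by omega)
      have hslice : PySem.List.slice (orig ++ [' ']) (some (i : Int)) (some ((i : Int) + 2)) = (orig.drop i ++ [' ']).take 2 := by
        rw [show (i : Int) + 2 = (i : Int) + ((2 : Nat) : Int) by norm_num,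
            PySem.List.slice_natCast_add, hdrops]
      cases hd : orig.drop i with
      | nil =>
        have := congrArg List.length hd
        simp at this
        omega
      | cons c t =>
        have hgetc : orig[i]? = some c := by rw [← List.head?_drop, hd]; rfl
        have hgdc : orig.getD i ' ' = c := by rw [List.getD_eq_getElem?_getD, hgetc]; rfl
        have hdt : orig.drop (i+1) = t := by rw [← List.tail_drop, hd]; rfl
        cases ht : t with
        | nil =>
          -- last character of the string: the two-char window is [c, ' ']
          subst ht
          have hcnd : ¬ (PySem.List.slice (orig ++ [' ']) (some (i : Int)) (some ((i : Int) + 2)) = ['i', 's']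
              ∧ PySem.Chars.isalpha (PySem.List.pyGetD (orig ++ [' ']) ((i : Int) - 1) ' ') = false
              ∧ PySem.Chars.isalpha (PySem.List.pyGetD (orig ++ [' ']) ((i : Int) + 2) ' ') = false) := by
            rintro ⟨h4, -, -⟩
            rw [hslice, hd] at h4
            simp at h4
          rw [notreplaceGo, dif_pos hglt, if_neg hcnd,
              if_neg (by simp; omega : ¬ ((i : Int) = ((orig ++ [' ']).length : Int) - 1))]
          rw [show (i : Int) + 1 = ((i + 1 : Nat) : Int) by omega]
          rw [ih (i+1) (by omega) (by omega), hdt, hgi, hgdc]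
          have hL : fspec (prevA orig (i+1)) ([] : List Char) = [] := by rw [fspec]
          have hR : fspec (prevA orig i) [c] = [c] := by
            rw [fspec, if_neg (by rintro ⟨-, hx, -⟩; simp at hx), fspec]
          rw [hL, hR]
          simp
        | cons d t' =>
          subst ht
          have hgd : orig[i+1]? = some d := by rw [← List.head?_drop, hdt]; rfl
          have hdt2 : orig.drop (i+2) = t' := by rw [← List.tail_drop, hdt]; rfl
          have hsltake : (orig.drop i ++ [' ']).take 2 = [c, d] := by rw [hd]; rfl
          -- the character two to the right of i, as fspec sees it
          have hg2 : PySem.Chars.isalpha (PySem.List.pyGetD (orig ++ [' ']) ((i : Int) + 2) ' ') = !nonalphaHead t' := by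
            rw [show (i : Int) + 2 = ((i + 2 : Nat) : Int) by omega, PySem.List.pyGetD_natCast,
                List.getD_eq_getElem?_getD]
            cases ht2 : t' with
            | nil =>
              have hieq2 : i + 2 = orig.length := by
                have := congrArg List.length hd
                simp [ht2] at this
                omega
              have hsp : (orig ++ [' '])[orig.length]? = some ' ' := by
                rw [← List.head?_drop, List.drop_left]
                rfl
              rw [show i + 2 = orig.length from hieq2, hsp]
              decide
            | cons e t'' =>
              have hlt2 : i + 2 < orig.length := by
                have := congrArg List.length hd
                simp [ht2] at this
                omega
              have hge : orig[i+2]? = some e := by rw [← List.head?_drop, hdt2, ht2]; rfl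
              rw [List.getElem?_append_left hlt2, hge]
              simp [nonalphaHead]
          by_cases hP : c = 'i' ∧ d = 's' ∧ prevA orig i = false ∧ nonalphaHead t' = true
          · -- matched occurrence
            obtain ⟨hc, hdd, hpv, hnh⟩ := hP
            have hcnd : PySem.List.slice (orig ++ [' ']) (some (i : Int)) (some ((i : Int) + 2)) = ['i', 's']
                ∧ PySem.Chars.isalpha (PySem.List.pyGetD (orig ++ [' ']) ((i : Int) - 1) ' ') = false
                ∧ PySem.Chars.isalpha (PySem.List.pyGetD (orig ++ [' ']) ((i : Int) + 2) ' ') = false := by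
              refine ⟨by rw [hslice, hsltake, hc, hdd], by rw [hPrevEq, hpv], by rw [hg2, hnh]; rfl⟩
            rw [notreplaceGo, dif_pos hglt, if_pos hcnd, hslice, hsltake]
            cases ht2 : t' with
            | nil =>
              have hieq2 : i + 2 = orig.length := by
                have := congrArg List.length hd
                simp [ht2] at this
                omega
              rw [if_pos (by simp; omega : ((i : Int) + 2 = ((orig ++ [' ']).length : Int) - 1))]
              rw [notreplaceGo, dif_neg (by simp; omega)]
              have hR : fspec (prevA orig i) [c, d] = ['i', 's', ' ', 'n', 'o', 't'] := by
                rw [fspec, if_pos ⟨hc, by simp [hdd], hpv, by rw [ht2] at hnh; exact hnh⟩]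
                simp [fspec]
              rw [hR, hc, hdd]
              simp
            | cons e t'' =>
              have hlt2 : i + 2 < orig.length := by
                have := congrArg List.length hd
                simp [ht2] at this
                omega
              have hge : orig[i+2]? = some e := by rw [← List.head?_drop, hdt2, ht2]; rfl
              have hdt3 : orig.drop (i+3) = t'' := by rw [← List.tail_drop, hdt2, ht2]; rfl
              have hgi2 : PySem.List.pyGetD (orig ++ [' ']) ((i : Int) + 2) ' ' = e := by
                rw [show (i : Int) + 2 = ((i + 2 : Nat) : Int) by omega, PySem.List.pyGetD_natCast,
                    List.getD_eq_getElem?_getD, List.getElem?_append_left hlt2, hge]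
                rfl
              have halphae : PySem.Chars.isalpha e = false := by
                rw [ht2] at hnh
                simpa [nonalphaHead] using hnh
              rw [if_neg (by simp; omega : ¬ ((i : Int) + 2 = ((orig ++ [' ']).length : Int) - 1))]
              rw [show (i : Int) + 3 = ((i + 3 : Nat) : Int) by omega]
              rw [ih (i+3) (by omega) (by omega), hgi2, hdt3]
              have hprev3 : prevA orig (i+3) = PySem.Chars.isalpha e := by
                have hgg : orig[i+2]?.getD ' ' = e := by rw [hge]; rfl
                simp [prevA, show i + 3 - 1 = i + 2 from rfl, hgg]
              have hR : fspec (prevA orig i) (c :: d :: e :: t'') = 'i' :: 's' :: ' ' :: 'n' :: 'o' :: 't' :: fspec true (e :: t'') := by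
                rw [fspec, if_pos ⟨hc, by simp [hdd], hpv, by rw [ht2] at hnh; exact hnh⟩]
                rfl
              have hR2 : fspec true (e :: t'') = e :: fspec (PySem.Chars.isalpha e) t'' := by
                rw [fspec, if_neg (by rintro ⟨he, -⟩; rw [he] at halphae; exact absurd halphae (by decide))]
              rw [hR, hR2, hprev3, hc, hdd]
              simp
          · -- no insertion at i: copy one character
            have hcnd : ¬ (PySem.List.slice (orig ++ [' ']) (some (i : Int)) (some ((i : Int) + 2)) = ['i', 's']
                ∧ PySem.Chars.isalpha (PySem.List.pyGetD (orig ++ [' ']) ((i : Int) - 1) ' ') = false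
                ∧ PySem.Chars.isalpha (PySem.List.pyGetD (orig ++ [' ']) ((i : Int) + 2) ' ') = false) := by
              rintro ⟨h4, h5, h6⟩
              rw [hslice, hsltake] at h4
              rw [hPrevEq] at h5
              rw [hg2] at h6
              simp at h4
              apply hP
              refine ⟨h4.1, h4.2, h5, ?_⟩
              cases hq : nonalphaHead t'
              · rw [hq] at h6; simp at h6
              · rfl
            rw [notreplaceGo, dif_pos hglt, if_neg hcnd,
                if_neg (by simp; omega : ¬ ((i : Int) = ((orig ++ [' ']).length : Int) - 1))]
            rw [show (i : Int) + 1 = ((i + 1 : Nat) : Int) by omega]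
            rw [ih (i+1) (by omega) (by omega), hgi, hgdc, hdt]
            have hprev1 : prevA orig (i+1) = PySem.Chars.isalpha c := by
              have hgg : orig[i]?.getD ' ' = c := by rw [hgetc]; rfl
              simp [prevA, show i + 1 - 1 = i from rfl, hgg]
            have hR : fspec (prevA orig i) (c :: d :: t') = c :: fspec (PySem.Chars.isalpha c) (d :: t') := by
              rw [fspec, if_neg (by rintro ⟨hc2, hdd2, hpv2, hnh2⟩; exact hP ⟨hc2, by simpa using hdd2, hpv2, by simpa using hnh2⟩)]
            rw [hR, hprev1]
            simp

theorem fspec_no_is (u : List Char) (h : ¬ (['i', 's'] <:+: u)) (prev : Bool) : fspec prev u = u := by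
  induction u generalizing prev with
  | nil => rw [fspec]
  | cons c t ih =>
    rw [fspec]
    have hnp : ¬ (c = 'i' ∧ t.head? = some 's' ∧ prev = false ∧ nonalphaHead t.tail = true) := by
      rintro ⟨rfl, h2, -, -⟩
      apply h
      cases t with
      | nil => simp at h2
      | cons d t' =>
        simp at h2
        subst h2
        have hp : ['i', 's'] <+: 'i' :: 's' :: t' := ⟨t', rfl⟩
        exact hp.isInfix
    rw [if_neg hnp, ih (fun hi => h (List.infix_cons hi))]

theorem fspec_copy (orig : List Char) : ∀ (n k j : Nat), j - k ≤ n → k ≤ j → j ≤ orig.length →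
    (∀ m, k ≤ m → m < j → ¬ ['i', 's'] <+: orig.drop m) →
    fspec (prevA orig k) (orig.drop k) = (orig.drop k).take (j - k) ++ fspec (prevA orig j) (orig.drop j) := by
  intro n
  induction n with
  | zero =>
    intro k j h1 h2 h3 hmin
    have : k = j := by omega
    subst this
    simp
  | succ n ih =>
    intro k j h1 h2 h3 hmin
    rcases Nat.eq_or_lt_of_le h2 with rfl | hkj
    · simp
    · have hk : k < orig.length := by omega
      have hdrop : orig.drop k = orig[k] :: orig.drop (k+1) := List.drop_eq_getElem_cons hk
      rw [hdrop, fspec]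
      have hnp : ¬ (orig[k] = 'i' ∧ (orig.drop (k+1)).head? = some 's' ∧ prevA orig k = false ∧ nonalphaHead (orig.drop (k+1)).tail = true) := by
        rintro ⟨h4, h5, -, -⟩
        apply hmin k le_rfl hkj
        refine ⟨(orig.drop (k+1)).tail, ?_⟩
        rw [hdrop, h4]
        cases hd : orig.drop (k+1) with
        | nil => rw [hd] at h5; simp at h5
        | cons d t' =>
          rw [hd] at h5
          simp at h5
          subst h5
          simp
      rw [if_neg hnp]
      have hprev : PySem.Chars.isalpha orig[k] = prevA orig (k+1) := by
        simp [prevA, List.getElem?_eq_getElem hk]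
      rw [hprev, ih (k+1) j (by omega) (by omega) h3 (fun m hm hm2 => hmin m (by omega) hm2)]
      have hjk : j - k = (j - (k+1)) + 1 := by omega
      rw [hjk, List.take_succ_cons]
      simp

theorem bGo_eq (orig : List Char) : ∀ (n i : Nat), orig.length - i ≤ n → i ≤ orig.length →
    ∀ parts, notreplaceAltGo orig i parts = parts.flatten ++ fspec (prevA orig i) (orig.drop i) := by
  intro n
  induction n with
  | zero =>
    intro i h1 h2 parts
    have hieq : i = orig.length := by omega
    subst hieq
    have hJ : PySem.Chars.findFrom orig ['i', 's'] (orig.length : Int) none = -1 := by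
      rw [PySem.Chars.findFrom_natCast_eq_neg_one_iff orig _ orig.length le_rfl]
      simp
    rw [notreplaceAltGo]
    simp only [hJ]
    rw [dif_pos trivial]
    rw [PySem.List.slice_from_natCast]
    simp [fspec]
  | succ n ih =>
    intro i h1 h2 parts
    rw [notreplaceAltGo]
    by_cases hJ : PySem.Chars.findFrom orig ['i', 's'] (i : Int) none = -1
    · simp only [hJ]
      rw [dif_pos trivial]
      have hnin : ¬ (['i', 's'] <:+: orig.drop i) :=
        (PySem.Chars.findFrom_natCast_eq_neg_one_iff orig _ i h2).mp hJ
      rw [fspec_no_is _ hnin, PySem.List.slice_from_natCast]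
      simp
    · simp only [dif_neg hJ]
      obtain ⟨hij, hpre, hmin⟩ := PySem.Chars.findFrom_natCast_spec orig ['i', 's'] i h2 hJ
      set J := PySem.Chars.findFrom orig ['i', 's'] (i : Int) none with hJdef
      set jn := J.toNat with hjndef
      have hJn : J = (jn : Int) := by omega
      obtain ⟨t', ht'⟩ := hpre
      have hd0 : orig.drop jn = 'i' :: 's' :: t' := ht'.symm
      have hlen2 : jn + 2 ≤ orig.length := by
        have := congrArg List.length hd0
        simp at this
        omega
      have hijn : i ≤ jn := by omega
      have hd1 : orig.drop (jn+1) = 's' :: t' := by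
        rw [← List.tail_drop, hd0]
        rfl
      have hd2 : orig.drop (jn+2) = t' := by
        rw [← List.tail_drop, hd1]
        rfl
      have hg0 : orig[jn]? = some 'i' := by
        rw [← List.head?_drop, hd0]
        rfl
      have hg1 : orig[jn+1]? = some 's' := by
        rw [← List.head?_drop, hd1]
        rfl
      have hleft : (decide (J = 0) || !PySem.Chars.isalpha (PySem.List.pyGetD orig (J - 1) ' ')) = !prevA orig jn := by
        by_cases h0 : jn = 0
        · rw [hJn, h0]
          simp [prevA, h0]
        · have hc1 : J - 1 = ((jn - 1 : Nat) : Int) := by omega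
          have hc0 : ¬ (J = 0) := by omega
          rw [hc1]
          simp [prevA, h0, hc0]
      have hright : (decide ((orig.length : Int) ≤ J + 2) || !PySem.Chars.isalpha (PySem.List.pyGetD orig (J + 2) ' ')) = nonalphaHead t' := by
        by_cases hl : jn + 2 = orig.length
        · have ht'nil : t' = [] := by
            have hlen := congrArg List.length hd0
            simp at hlen
            cases t' with
            | nil => rfl
            | cons e rest => simp at hlen; omega
          have hle : (orig.length : Int) ≤ J + 2 := by omega
          rw [ht'nil]
          simp [nonalphaHead, hle]
        · have hlt : jn + 2 < orig.length := by omega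
          have hc2 : J + 2 = ((jn + 2 : Nat) : Int) := by omega
          cases ht2 : t' with
          | nil =>
            have hlen := congrArg List.length hd0
            simp [ht2] at hlen
            omega
          | cons e rest =>
            have hge : orig[jn+2]? = some e := by
              rw [← List.head?_drop, hd2, ht2]
              rfl
            have hnle : ¬ ((orig.length : Int) ≤ (jn : Int) + 2) := by omega
            rw [hc2, PySem.List.pyGetD_natCast, List.getD_eq_getElem?_getD, hge]
            simp [nonalphaHead, hnle]
      have hcopy := fspec_copy orig orig.length i jn (by omega) hijn (by omega) (fun m hm hm2 => hmin m hm hm2)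
      rw [hcopy, hd0, fspec]
      rw [hleft, hright]
      have hgd0 : orig.getD jn ' ' = 'i' := by
        rw [List.getD_eq_getElem?_getD, hg0]
        rfl
      have hgd1 : orig.getD (jn+1) ' ' = 's' := by
        rw [List.getD_eq_getElem?_getD, hg1]
        rfl
      by_cases hpa : prevA orig jn = false
      · by_cases hna : nonalphaHead t' = true
        · -- matched occurrence: both sides insert " not"
          rw [show (J + 2).toNat = jn + 2 by omega]
          rw [ih (jn+2) (by omega) (by omega)]
          have hprev2 : prevA orig (jn+2) = true := by
            have hgg : orig[jn+1]?.getD ' ' = 's' := by rw [hg1]; rfl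
            simp [prevA, show jn + 2 - 1 = jn + 1 from rfl, hgg,
                  (by decide : PySem.Chars.isalpha 's' = true)]
          have hsl : PySem.List.slice orig (some (i : Int)) (some (J + 2)) = (orig.drop i).take (jn - i) ++ ['i', 's'] := by
            rw [show J + 2 = ((jn + 2 : Nat) : Int) by omega, PySem.List.slice_natCast,
                show jn + 2 - i = (jn - i) + 2 by omega, List.take_add]
            congr 1
            rw [List.drop_drop, show i + (jn - i) = jn by omega, hd0]
            rfl
          rw [hsl, hprev2, hd2]
          simp [hpa, hna, List.append_assoc]
        · -- right boundary alphabetic: plain copy past the 'i'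
          simp only [hpa, hna]
          rw [if_neg (by simp [hna]), if_neg (by simp [hna])]
          rw [show (J + 1).toNat = jn + 1 by omega]
          rw [ih (jn+1) (by omega) (by omega)]
          have hprev1 : prevA orig (jn+1) = true := by
            have hgg : orig[jn]?.getD ' ' = 'i' := by rw [hg0]; rfl
            simp [prevA, show jn + 1 - 1 = jn from rfl, hgg,
                  (by decide : PySem.Chars.isalpha 'i' = true)]
          have hsl : PySem.List.slice orig (some (i : Int)) (some (J + 1)) = (orig.drop i).take (jn - i) ++ ['i'] := by
            rw [show J + 1 = ((jn + 1 : Nat) : Int) by omega, PySem.List.slice_natCast,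
                show jn + 1 - i = (jn - i) + 1 by omega, List.take_add]
            congr 1
            rw [List.drop_drop, show i + (jn - i) = jn by omega, hd0]
            rfl
          rw [hsl, hd1, hprev1]
          simp [show PySem.Chars.isalpha 'i' = true from rfl, List.append_assoc]
      · -- left boundary alphabetic: plain copy past the 'i'
        have hpa' : prevA orig jn = true := by
          cases h : prevA orig jn
          · exact absurd h hpa
          · rfl
        rw [if_neg (by simp [hpa']), if_neg (by simp [hpa])]
        rw [show (J + 1).toNat = jn + 1 by omega]
        rw [ih (jn+1) (by omega) (by omega)]
        have hprev1 : prevA orig (jn+1) = true := by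
          have hgg : orig[jn]?.getD ' ' = 'i' := by rw [hg0]; rfl
          simp [prevA, show jn + 1 - 1 = jn from rfl, hgg,
                (by decide : PySem.Chars.isalpha 'i' = true)]
        have hsl : PySem.List.slice orig (some (i : Int)) (some (J + 1)) = (orig.drop i).take (jn - i) ++ ['i'] := by
          rw [show J + 1 = ((jn + 1 : Nat) : Int) by omega, PySem.List.slice_natCast,
              show jn + 1 - i = (jn - i) + 1 by omega, List.take_add]
          congr 1
          rw [List.drop_drop, show i + (jn - i) = jn by omega, hd0]
          rfl
        rw [hsl, hd1, hprev1]
        simp [show PySem.Chars.isalpha 'i' = true from rfl, List.append_assoc]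

-- ===== VERDICT (by name: the statement is the Claim_ definition above) =====
theorem notreplace_spec : Claim_equal_notreplace := by
  intro a _
  unfold Spec_notreplace notreplace notreplace_alt
  have hA := aGo_eq a.toList a.toList.length 0 (by omega) (by omega) []
  have hB := bGo_eq a.toList a.toList.length 0 (by omega) (by omega) []
  norm_num at hA hB
  rw [hA, hB]
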